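-- pv_equiv track=rewrite | github.com/SKNETWORKS-FAMILY-AICAMP/SKN21-FINAL-4TEAM | backend/app/services/character_card_service.py | _parse_mes_example
-- ===== SOURCE A (Python) =====
-- def _parse_mes_example(mes_example: str) -> list[dict]:
--     """Parse SillyTavern mes_example format into structured dialogues."""
--     dialogues = []
--     current = {}
--
--     for line in mes_example.split("\n"):
--         line = line.strip()
--         if line == "<START>":
--             if current:
--                 dialogues.append(current)
--             current = {}
--         elif line.startswith("{{user}}:"):
--             current["user"] = line[len("{{user}}:") :].strip()
--         elif line.startswith("{{char}}:"):
--             current["assistant"] = line[len("{{char}}:") :].strip()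
--
--     if current:
--         dialogues.append(current)
--
--     return dialogues
-- ===== SOURCE B (Python) =====
-- def _parse_mes_example(mes_example: str) -> list[dict]:
--     """Parse SillyTavern mes_example: group stripped lines into <START>-blocks, then map each block to a dict."""
--     lines = [l.strip() for l in mes_example.split("\n")]
--     blocks = []
--     cur = []
--     for l in lines:
--         if l == "<START>":
--             blocks.append(cur)
--             cur = []
--         else:
--             cur.append(l)
--     blocks.append(cur)
--     dialogues = []
--     for blk in blocks:
--         d = {}
--         for l in blk:
--             if l.startswith("{{user}}:"):
--                 d["user"] = l[len("{{user}}:"):].strip()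
--             elif l.startswith("{{char}}:"):
--                 d["assistant"] = l[len("{{char}}:"):].strip()
--         if d:
--             dialogues.append(d)
--     return dialogues
-- ===== Notes on version B (the rewrite author's own statement) =====
-- stated objective: simpler
-- what changed: Replaces A's single stateful scan (dialogues list plus a mutable current dict flushed at each marker) by a pipeline: strip all lines, group them into <START>-delimited blocks, map each block independently to its dict, and keep the non-empty ones.
import Mathlib
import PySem

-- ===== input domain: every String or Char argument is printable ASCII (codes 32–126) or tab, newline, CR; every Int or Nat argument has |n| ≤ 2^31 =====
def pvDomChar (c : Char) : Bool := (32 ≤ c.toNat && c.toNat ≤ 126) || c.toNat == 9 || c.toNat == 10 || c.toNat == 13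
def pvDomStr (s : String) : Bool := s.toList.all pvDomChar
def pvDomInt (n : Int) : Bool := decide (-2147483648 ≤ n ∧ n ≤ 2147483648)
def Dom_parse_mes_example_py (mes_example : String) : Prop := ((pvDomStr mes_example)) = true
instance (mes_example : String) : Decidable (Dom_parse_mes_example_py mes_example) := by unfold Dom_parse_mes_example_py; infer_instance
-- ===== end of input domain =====

-- B restructures A's single stateful scan into a strip / group-into-<START>-blocks / map-each-block pipeline (objective: simpler).

-- ===== PORT A =====
-- loop body of A: line = line.strip(); flush current on "<START>", else update current.
-- line[len("{{user}}:"):] is the slice from index 9.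
def pvA_step (st : List (List (String × String)) × PySem.Dict String String) (line : String) :
    List (List (String × String)) × PySem.Dict String String :=
  let l := PySem.Str.strip line
  if l = "<START>" then
    (if st.2.items ≠ [] then st.1 ++ [st.2.items] else st.1, PySem.Dict.empty)
  else if PySem.Str.startswith l "{{user}}:" then
    (st.1, st.2.insert "user" (PySem.Str.strip (PySem.Str.slice l (some 9) none)))
  else if PySem.Str.startswith l "{{char}}:" then
    (st.1, st.2.insert "assistant" (PySem.Str.strip (PySem.Str.slice l (some 9) none)))
  else st

-- A's trailing "if current: dialogues.append(current)"
def pvA_finish (st : List (List (String × String)) × PySem.Dict String String) :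
    List (List (String × String)) :=
  if st.2.items ≠ [] then st.1 ++ [st.2.items] else st.1

-- split? is exact for mes_example.split("\n"); the separator is non-empty so getD never fires
def parse_mes_example_py (mes_example : String) : List (List (String × String)) :=
  pvA_finish (((PySem.Str.split? mes_example "\n").getD []).foldl pvA_step ([], PySem.Dict.empty))

-- ===== PORT B =====
-- grouping loop of B: start a new block at each stripped "<START>" line
def pvB_group (st : List (List String) × List String) (l : String) :
    List (List String) × List String :=
  if l = "<START>" then (st.1 ++ [st.2], []) else (st.1, st.2 ++ [l])

-- inner loop of B over one block's lines
def pvB_upd (d : PySem.Dict String String) (l : String) : PySem.Dict String String :=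
  if PySem.Str.startswith l "{{user}}:" then
    d.insert "user" (PySem.Str.strip (PySem.Str.slice l (some 9) none))
  else if PySem.Str.startswith l "{{char}}:" then
    d.insert "assistant" (PySem.Str.strip (PySem.Str.slice l (some 9) none))
  else d

def pvB_block (blk : List String) : PySem.Dict String String :=
  blk.foldl pvB_upd PySem.Dict.empty

-- B's output loop: d = block's dict; if d: dialogues.append(d)
def pvB_collect (acc : List (List (String × String))) (blk : List String) :
    List (List (String × String)) :=
  if (pvB_block blk).items ≠ [] then acc ++ [(pvB_block blk).items] else acc

def parse_mes_example_py_alt (mes_example : String) : List (List (String × String)) :=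
  let lines := ((PySem.Str.split? mes_example "\n").getD []).map PySem.Str.strip
  let g := lines.foldl pvB_group ([], [])
  (g.1 ++ [g.2]).foldl pvB_collect []

-- ===== PRECONDITION & SPEC =====
def Spec_parse_mes_example_py (mes_example : String) (out : List (List (String × String))) : Prop := out = parse_mes_example_py_alt mes_example
instance (mes_example : String) (out : List (List (String × String))) : Decidable (Spec_parse_mes_example_py mes_example out) := by unfold Spec_parse_mes_example_py; infer_instance

-- ===== CLAIM (what is proved, stated in full; the proofs are below) =====
def Claim_equal_parse_mes_example_py : Prop := ∀ (mes_example : String), Dom_parse_mes_example_py mes_example → Spec_parse_mes_example_py mes_example (parse_mes_example_py mes_example)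

-- ===== LEMMAS AND PROOFS =====

-- the dialogues contributed by one finished dict
def pvEmit (d : PySem.Dict String String) : List (List (String × String)) :=
  if d.items ≠ [] then [d.items] else []

-- common reference form: the dialogues of the remaining (already stripped) lines, given the current dict
def pvEmitAll (d : PySem.Dict String String) : List String → List (List (String × String))
  | [] => pvEmit d
  | l :: ls => if l = "<START>" then pvEmit d ++ pvEmitAll PySem.Dict.empty ls
               else pvEmitAll (pvB_upd d l) ls

def pvProcAll (bl : List (List String)) : List (List (String × String)) :=
  bl.flatMap (fun blk => pvEmit (pvB_block blk))

theorem pvA_step_eq (st : List (List (String × String)) × PySem.Dict String String) (line : String) :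
    pvA_step st line =
      if PySem.Str.strip line = "<START>" then (st.1 ++ pvEmit st.2, PySem.Dict.empty)
      else (st.1, pvB_upd st.2 (PySem.Str.strip line)) := by
  simp only [pvA_step, pvB_upd, pvEmit]
  split_ifs <;> simp

theorem pvA_finish_eq (acc : List (List (String × String))) (cur : PySem.Dict String String) :
    pvA_finish (acc, cur) = acc ++ pvEmit cur := by
  simp only [pvA_finish, pvEmit]; split_ifs <;> simp

theorem pvA_loop (ls : List String) : ∀ (acc : List (List (String × String)))
    (cur : PySem.Dict String String),
    pvA_finish (ls.foldl pvA_step (acc, cur)) = acc ++ pvEmitAll cur (ls.map PySem.Str.strip) := by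
  induction ls with
  | nil => intro acc cur; simp [pvEmitAll, pvA_finish_eq]
  | cons l ls ih =>
    intro acc cur
    rw [List.foldl_cons, pvA_step_eq, List.map_cons]
    by_cases h : PySem.Str.strip l = "<START>"
    · rw [if_pos h, ih]
      simp [pvEmitAll, h]
    · rw [if_neg h, ih]
      simp [pvEmitAll, h]

theorem pvB_collect_loop (bl : List (List String)) : ∀ (acc : List (List (String × String))),
    bl.foldl pvB_collect acc = acc ++ pvProcAll bl := by
  induction bl with
  | nil => intro acc; simp [pvProcAll]
  | cons b bl ih =>
    intro acc
    rw [List.foldl_cons, ih]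
    simp only [pvB_collect, pvProcAll, List.flatMap_cons, pvEmit]
    split_ifs <;> simp

theorem pvB_group_loop (ls : List String) : ∀ (blocks : List (List String)) (cur : List String),
    pvProcAll ((ls.foldl pvB_group (blocks, cur)).1 ++ [(ls.foldl pvB_group (blocks, cur)).2]) =
      pvProcAll blocks ++ pvEmitAll (pvB_block cur) ls := by
  induction ls with
  | nil => intro blocks cur; simp [pvProcAll, pvEmitAll]
  | cons l ls ih =>
    intro blocks cur
    rw [List.foldl_cons]
    by_cases h : l = "<START>"
    · have hg : pvB_group (blocks, cur) l = (blocks ++ [cur], []) := by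
        simp [pvB_group, h]
      rw [hg, ih]
      have hempty : pvB_block ([] : List String) = PySem.Dict.empty := rfl
      rw [hempty]
      simp [pvProcAll, pvEmitAll, h]
    · have hg : pvB_group (blocks, cur) l = (blocks, cur ++ [l]) := by
        simp [pvB_group, h]
      rw [hg, ih]
      have hb : pvB_block (cur ++ [l]) = pvB_upd (pvB_block cur) l := by
        simp [pvB_block, List.foldl_append]
      rw [hb]
      simp [pvEmitAll, h]

-- ===== VERDICT (by name: the statement is the Claim_ definition above) =====
theorem parse_mes_example_py_spec : Claim_equal_parse_mes_example_py := by
  intro s _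
  show parse_mes_example_py s = parse_mes_example_py_alt s
  simp only [parse_mes_example_py, parse_mes_example_py_alt]
  rw [pvA_loop, pvB_collect_loop, pvB_group_loop]
  have : pvB_block ([] : List String) = PySem.Dict.empty := rfl
  rw [this]
  simp [pvProcAll]
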